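-- pv_equiv track=rewrite | github.com/915dbfl/youlAlgorithm | python/zip/simulation/최고의_집합.py | solution
-- ===== SOURCE A (Python) =====
-- def solution(n, s):
--     if n > s:
--         return [-1]
--     else:
--         base = s // n
--         answer = [base] * n
--
--         if base * n < s:
--             sum = base * n
--             idx = n-1
--             while sum < s:
--                 answer[idx] += 1
--                 sum += 1
--                 idx -= 1
--
--         return answer
-- ===== SOURCE B (Python) =====
-- def solution(n, s):
--     if n > s:
--         return [-1]
--     base, rem = divmod(s, n)
--     return [base] * (n - rem) + [base + 1] * rem
-- ===== Notes on version B (the rewrite author's own statement) =====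
-- stated objective: simpler
-- what changed: Replaces A's while-loop that mutates the tail of the list one element at a time with a single divmod and a closed-form construction of two homogeneous blocks.
import Mathlib
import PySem

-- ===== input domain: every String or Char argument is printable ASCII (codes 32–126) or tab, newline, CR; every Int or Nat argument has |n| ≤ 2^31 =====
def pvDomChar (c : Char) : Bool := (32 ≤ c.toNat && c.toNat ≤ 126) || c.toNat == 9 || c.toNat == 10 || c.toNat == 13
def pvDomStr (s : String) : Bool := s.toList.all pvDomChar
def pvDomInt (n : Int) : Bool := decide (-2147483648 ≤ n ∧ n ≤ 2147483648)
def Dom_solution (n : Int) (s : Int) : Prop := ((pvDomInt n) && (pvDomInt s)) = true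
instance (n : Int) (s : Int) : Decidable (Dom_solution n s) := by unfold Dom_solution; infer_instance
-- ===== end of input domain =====

-- B replaces A's tail-incrementing while-loop with one divmod and a closed-form two-block list construction (objective: simpler).


-- ===== PORT A =====
-- the while loop: answer[idx] += 1; sum += 1; idx -= 1  while sum < s
-- (pyGetD/pySetD defaults are unreachable inside Pre_, where idx stays in range whenever the loop runs)
def solLoop (answer : List Int) (sum : Int) (idx : Int) (s : Int) : List Int :=
  if h : sum < s then
    solLoop (PySem.List.pySetD answer idx (PySem.List.pyGetD answer idx 0 + 1)) (sum + 1) (idx - 1) s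
  else
    answer
termination_by (s - sum).toNat
decreasing_by omega

def solution (n : Int) (s : Int) : List Int :=
  if n > s then [-1]
  else
    let base := PySem.Int.floordiv s n   -- Python raises ZeroDivisionError at n = 0 (with s ≥ 0 here); excluded by Pre_
    let answer := List.replicate n.toNat base   -- [base] * n (empty for n ≤ 0, like Python)
    if base * n < s then solLoop answer (base * n) (n - 1) s
    else answer

-- ===== PORT B =====
def solution_alt (n : Int) (s : Int) : List Int :=
  if n > s then [-1]
  else
    match PySem.Int.divmod? s n with
    | none => []   -- Python raises ZeroDivisionError here (n = 0); excluded by Pre_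
    | some (base, rem) =>
        List.replicate (n - rem).toNat base ++ List.replicate rem.toNat (base + 1)

-- ===== PRECONDITION & SPEC =====
-- Pre_ excludes exactly n = 0 with 0 ≤ s, where both A and B raise ZeroDivisionError.
def Pre_solution (n : Int) (s : Int) : Prop := ¬ (n = 0 ∧ 0 ≤ s)
instance (n : Int) (s : Int) : Decidable (Pre_solution n s) := by unfold Pre_solution; infer_instance
def pvWitness_solution : Int × Int := (3, 7)

def Spec_solution (n : Int) (s : Int) (out : List Int) : Prop := out = solution_alt n s
instance (n : Int) (s : Int) (out : List Int) : Decidable (Spec_solution n s out) := by unfold Spec_solution; infer_instance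

-- ===== CLAIM (what is proved, stated in full; the proofs are below) =====
def Claim_equal_solution : Prop := ∀ (n : Int) (s : Int), Dom_solution n s → Pre_solution n s → Spec_solution n s (solution n s)

-- ===== LEMMAS AND PROOFS =====

-- setting index j-1 of (replicate j B ++ tail) to v appends v to the (B+1)-block
lemma set_replicate_append (j : ℕ) (hj : 1 ≤ j) (B v : Int) (t : List Int) :
    (List.replicate j B ++ t).set (j - 1) v = List.replicate (j - 1) B ++ v :: t := by
  induction j with
  | zero => omega
  | succ k ih =>
    cases k with
    | zero => simp
    | succ k' =>
      have hih := ih (by omega)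
      simp only [List.replicate_succ, List.cons_append, Nat.add_sub_cancel] at hih ⊢
      simp [hih]

lemma loop_inv : ∀ (R j m : ℕ) (B s : Int), R ≤ j →
    solLoop (List.replicate j B ++ List.replicate m (B + 1)) (s - R) ((j : Int) - 1) s
      = List.replicate (j - R) B ++ List.replicate (m + R) (B + 1) := by
  intro R
  induction R with
  | zero => intro j m B s _; rw [solLoop]; simp
  | succ r ih =>
    intro j m B s hR
    rw [solLoop]
    have hlt : s - ((r : Int) + 1) < s := by omega
    have hj1 : 1 ≤ j := by omega
    have hidx : ((j : Int) - 1) = ((j - 1 : ℕ) : Int) := by omega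
    have hget : PySem.List.pyGetD (List.replicate j B ++ List.replicate m (B + 1)) ((j : Int) - 1) 0 = B := by
      rw [hidx, PySem.List.pyGetD_natCast]
      have : (List.replicate j B ++ List.replicate m (B + 1))[(j - 1 : ℕ)]? = some B := by
        rw [List.getElem?_append_left (by simp; omega)]
        simp [List.getElem?_replicate]; omega
      simp [List.getD, this]
    have hset : PySem.List.pySetD (List.replicate j B ++ List.replicate m (B + 1)) ((j : Int) - 1) (B + 1)
        = List.replicate (j - 1) B ++ List.replicate (m + 1) (B + 1) := by
      rw [hidx, PySem.List.pySetD_natCast, set_replicate_append j hj1]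
      simp [List.replicate_succ]
    push_cast
    rw [dif_pos hlt, hget, hset]
    have := ih (j - 1) (m + 1) B s (by omega)
    rw [show ((j - 1 : ℕ) : Int) - 1 = (j : Int) - 1 - 1 by omega,
        show s - ((r : ℕ) : Int) = s - (r : Int) + 1 - 1 + 1 - 1 by ring] at this
    rw [show s - ((r : Int) + 1) + 1 = s - (r : Int) + 1 - 1 + 1 - 1 by ring, this,
        show j - 1 - r = j - (r + 1) by omega, show m + 1 + r = m + (r + 1) by omega]

-- ===== VERDICT (by name: the statement is the Claim_ definition above) =====
theorem solution_spec : Claim_equal_solution := by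
  intro n s _ hpre
  unfold Spec_solution solution solution_alt
  by_cases hgt : n > s
  · simp [hgt]
  · simp only [if_neg hgt]
    have hn0 : n ≠ 0 := by intro h; exact hpre ⟨h, by omega⟩
    have hdm : PySem.Int.divmod? s n = some (PySem.Int.floordiv s n, PySem.Int.mod s n) := by
      simp [PySem.Int.divmod?, hn0, PySem.Int.floordiv, PySem.Int.mod]
    rw [hdm]
    set B := PySem.Int.floordiv s n with hB
    set r := PySem.Int.mod s n with hr
    have heq : B * n + r = s := PySem.Int.floordiv_mul_add_mod s n
    rcases lt_or_gt_of_ne hn0 with hneg | hpos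
    · -- n < 0: both sides are []
      have hb := PySem.Int.mod_neg_bounds s hneg
      have h1 : ¬ B * n < s := by omega
      have h2 : n.toNat = 0 := by omega
      have h3 : (n - r).toNat = 0 := by omega
      have h4 : r.toNat = 0 := by omega
      simp [h1, h2, h3, h4]
    · -- n > 0
      have hr0 : 0 ≤ r := PySem.Int.mod_nonneg s hpos
      have hrn : r < n := PySem.Int.mod_lt s hpos
      by_cases hrem : B * n < s
      · -- r > 0: the loop fires r times
        have hrpos : 0 < r := by omega
        have key := loop_inv r.toNat n.toNat 0 B s (by omega)
        rw [show ((r.toNat : ℕ) : Int) = r by omega] at key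
        simp only [List.replicate_zero, List.append_nil, Nat.zero_add] at key
        rw [if_pos hrem, show B * n = s - r by omega,
            show n - 1 = ((n.toNat : ℕ) : Int) - 1 by omega, key,
            show n.toNat - r.toNat = (n - r).toNat by omega]
      · -- r = 0
        have hr0' : r = 0 := by omega
        simp [if_neg hrem, hr0']
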